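-- pv_equiv track=rewrite | github.com/kpwce/structural-probes-cse582 | structural-probes/language_alignment.py | get_alignment_2
-- ===== SOURCE A (Python) =====
-- def get_alignment_2(sublist, monolingual_list):
--     """
--     Find and return the interval in the monolingual list that best matches the given sublist.
--     "Best matches" is defined as the number of matching tokens.
--
--     :Parameters:
--     - :sublist: The list of words to align to
--     - :monolingual_list: The monolingual text we will search through to find some interval
--         that aligns with the given sublist
--     """
--
--     best_subarray = []
--     best_cost = float("inf")
--     for start in range(0, len(monolingual_list) - len(sublist) + 1):
--         # check interval of start..start + len(sublist)
--         # nuggets spicy vs spicy nuggets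
--         subarray_target = sublist.copy()
--         subarray_current = monolingual_list[start:start + len(sublist)]
--         cost = 0
--         for token in subarray_current:
--             count = subarray_target.count(token)
--             if (count == 0):
--                 cost += 1
--             else:
--                 subarray_target.remove(token)
--         if (cost < best_cost):
--             best_cost = cost
--             best_subarray = subarray_current
--     return best_subarray
-- ===== SOURCE B (Python) =====
-- def get_alignment_2(sublist, monolingual_list):
--     """Sliding-window re-implementation: one pass with an incremental
--     token-count dictionary instead of re-counting every window."""
--     L = len(sublist)
--     n = len(monolingual_list)
--     if n < L:
--         return []
--     count = {}
--     for t in sublist: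
--         count[t] = count.get(t, 0) + 1
--     cost = 0
--     for t in monolingual_list[:L]:
--         c = count.get(t, 0)
--         if c <= 0:
--             cost += 1
--         count[t] = c - 1
--     best_start = 0
--     best_cost = cost
--     for i in range(L, n):
--         t = monolingual_list[i]
--         c = count.get(t, 0)
--         if c <= 0:
--             cost += 1
--         count[t] = c - 1
--         u = monolingual_list[i - L]
--         c2 = count.get(u, 0)
--         if c2 < 0:
--             cost -= 1
--         count[u] = c2 + 1
--         if cost < best_cost:
--             best_cost = cost
--             best_start = i - L + 1
--     return monolingual_list[best_start:best_start + L]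
-- ===== Notes on version B (the rewrite author's own statement) =====
-- stated objective: faster
-- what changed: Replaces the per-window copy of sublist with quadratic count/remove scans by a single sliding-window pass that keeps a token-count dictionary and an incrementally updated mismatch cost, tracking only the best start index.
import Mathlib
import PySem

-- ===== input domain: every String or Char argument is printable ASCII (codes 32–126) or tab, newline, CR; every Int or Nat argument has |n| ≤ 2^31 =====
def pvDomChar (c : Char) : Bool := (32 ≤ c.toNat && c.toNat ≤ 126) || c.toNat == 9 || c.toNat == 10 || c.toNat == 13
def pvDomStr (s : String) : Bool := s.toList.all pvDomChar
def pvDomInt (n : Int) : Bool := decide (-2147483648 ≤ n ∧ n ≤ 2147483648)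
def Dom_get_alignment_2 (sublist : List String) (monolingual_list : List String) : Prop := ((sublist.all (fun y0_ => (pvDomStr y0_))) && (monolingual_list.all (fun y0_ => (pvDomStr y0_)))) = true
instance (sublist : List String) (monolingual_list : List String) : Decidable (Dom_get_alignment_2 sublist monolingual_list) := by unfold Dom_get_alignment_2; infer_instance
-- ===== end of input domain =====

-- B replaces A's per-window count/remove rematching by one sliding-window pass with an
-- incrementally maintained count dictionary and mismatch cost (objective: faster).

-- ===== PORT A =====
-- loop body of A's `for start in range(...)`; float("inf") is ported as `none`
-- (cost < inf is always true, so the first window always replaces it)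
def pvStepA (sublist monolingual_list : List String)
    (st : List String × Option Int) (start : Int) : List String × Option Int :=
  let subarray_current := PySem.List.slice monolingual_list (some start) (some (start + (sublist.length : Int)))
  let inner := subarray_current.foldl
    (fun (tc : List String × Int) token =>
      if PySem.List.count tc.1 token == 0 then (tc.1, tc.2 + 1)
      else ((PySem.List.remove? tc.1 token).getD tc.1, tc.2))
    (sublist, 0)
  match st.2 with
  | none => (subarray_current, some inner.2)
  | some bc => if inner.2 < bc then (subarray_current, some inner.2) else st

def get_alignment_2 (sublist : List String) (monolingual_list : List String) : List String :=
  ((PySem.List.pyRange 0 ((monolingual_list.length : Int) - (sublist.length : Int) + 1) 1).foldl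
    (pvStepA sublist monolingual_list) ([], none)).1

-- ===== PORT B =====
-- body of B's first-window loop: `c = count.get(t, 0); if c <= 0: cost += 1; count[t] = c - 1`
def pvScanStep (p : PySem.Dict String Int × Int) (t : String) : PySem.Dict String Int × Int :=
  let c := p.1.getD t 0
  (p.1.insert t (c - 1), if c ≤ 0 then p.2 + 1 else p.2)

-- body of B's sliding loop `for i in range(L, n)`; state (count, cost, best_start, best_cost)
def pvSlideStep (sublist monolingual_list : List String)
    (st : PySem.Dict String Int × Int × Int × Int) (i : Int) :
    PySem.Dict String Int × Int × Int × Int :=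
  let t := PySem.List.pyGetD monolingual_list i ""                            -- i is in range
  let c := st.1.getD t 0
  let d1 := st.1.insert t (c - 1)
  let cost1 := if c ≤ 0 then st.2.1 + 1 else st.2.1
  let u := PySem.List.pyGetD monolingual_list (i - (sublist.length : Int)) "" -- i - L is in range
  let c2 := d1.getD u 0
  let d2 := d1.insert u (c2 + 1)
  let cost2 := if c2 < 0 then cost1 - 1 else cost1
  if cost2 < st.2.2.2 then (d2, cost2, i - (sublist.length : Int) + 1, cost2)
  else (d2, cost2, st.2.2.1, st.2.2.2)

def get_alignment_2_alt (sublist : List String) (monolingual_list : List String) : List String :=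
  if monolingual_list.length < sublist.length then [] else
  let count := sublist.foldl
    (fun (d : PySem.Dict String Int) t => d.insert t (d.getD t 0 + 1)) PySem.Dict.empty
  let first := (PySem.List.slice monolingual_list none (some (sublist.length : Int))).foldl
    pvScanStep (count, 0)
  let res := (PySem.List.pyRange (sublist.length : Int) (monolingual_list.length : Int) 1).foldl
    (pvSlideStep sublist monolingual_list) (first.1, first.2, 0, first.2)
  PySem.List.slice monolingual_list (some res.2.2.1) (some (res.2.2.1 + (sublist.length : Int)))

-- ===== PRECONDITION & SPEC =====
def Spec_get_alignment_2 (sublist : List String) (monolingual_list : List String) (out : List String) : Prop := out = get_alignment_2_alt sublist monolingual_list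
instance (sublist : List String) (monolingual_list : List String) (out : List String) : Decidable (Spec_get_alignment_2 sublist monolingual_list out) := by unfold Spec_get_alignment_2; infer_instance

-- ===== CLAIM (what is proved, stated in full; the proofs are below) =====
def Claim_equal_get_alignment_2 : Prop := ∀ (sublist : List String) (monolingual_list : List String), Dom_get_alignment_2 sublist monolingual_list → Spec_get_alignment_2 sublist monolingual_list (get_alignment_2 sublist monolingual_list)

-- ===== LEMMAS AND PROOFS =====

-- the window of length L starting at s
def pvWin (m : List String) (L s : Nat) : List String := (m.drop s).take L

-- mismatch cost of a window against sublist: size of the multiset difference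
def pvCost (sub w : List String) : Int := (((w : Multiset String)) - ((sub : Multiset String))).card

-- the first-minimum scan both loops perform: (best start, best cost) over starts 0..k
def pvBest (sub m : List String) (L : Nat) : Nat → Nat × Int
  | 0 => (0, pvCost sub (pvWin m L 0))
  | k+1 =>
    let prev := pvBest sub m L k
    let c := pvCost sub (pvWin m L (k+1))
    if c < prev.2 then (k+1, c) else prev

-- adding one copy of t to the window raises the deficit iff sub has no spare copy of t
lemma pvMs_add (ms s : Multiset String) (t : String) :
    ((ms + {t}) - s).card = (ms - s).card + (if s.count t ≤ ms.count t then 1 else 0) := by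
  have key : (ms + {t}) - s = (ms - s) + (if s.count t ≤ ms.count t then {t} else 0) := by
    ext a
    by_cases h : a = t <;>
      simp [Multiset.count_sub, Multiset.count_add, h] <;> split_ifs <;> simp [h] <;> omega
  rw [key]; split_ifs <;> simp

lemma pvMs_erase (ms s : Multiset String) (t : String) (ht : t ∈ s) :
    (ms + {t}) - s = ms - s.erase t := by
  ext a
  by_cases h : a = t
  · subst h
    have := Multiset.one_le_count_iff_mem.mpr ht
    simp [Multiset.count_sub, Multiset.count_add, Multiset.count_erase_self]
    omega
  · simp [Multiset.count_sub, Multiset.count_add, h, Multiset.count_erase_of_ne h]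

lemma pvCoe_cons (v : List String) (t : String) :
    ((t :: v : List String) : Multiset String) = ↑v + {t} := by
  rw [← Multiset.cons_coe, ← Multiset.singleton_add, add_comm]

lemma pvCoe_concat (v : List String) (t : String) :
    ((v ++ [t] : List String) : Multiset String) = ↑v + {t} := by
  rw [← Multiset.coe_add]
  rfl

lemma pvCost_nil (sub : List String) : pvCost sub [] = 0 := by
  simp [pvCost]

lemma pvCost_concat (sub u : List String) (t : String) :
    pvCost sub (u ++ [t]) = pvCost sub u + (if sub.count t ≤ u.count t then 1 else 0) := by
  unfold pvCost
  rw [pvCoe_concat, pvMs_add]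
  simp [Multiset.coe_count]

lemma pvCost_cons (sub v : List String) (u : String) :
    pvCost sub (u :: v) = pvCost sub v + (if sub.count u ≤ v.count u then 1 else 0) := by
  unfold pvCost
  rw [pvCoe_cons, pvMs_add]
  simp [Multiset.coe_count]

lemma pvCost_cons_erase (sub rest : List String) (t : String) (h : t ∈ sub) :
    pvCost sub (t :: rest) = pvCost (sub.erase t) rest := by
  unfold pvCost
  rw [pvCoe_cons, pvMs_erase _ _ _ (Multiset.mem_coe.mpr h), ← Multiset.coe_erase]

-- A's inner loop computes the window cost by greedy multiset matching
lemma pvInnerA (w : List String) : ∀ (sub : List String) (c : Int),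
    (w.foldl (fun (tc : List String × Int) token =>
        if PySem.List.count tc.1 token == 0 then (tc.1, tc.2 + 1)
        else ((PySem.List.remove? tc.1 token).getD tc.1, tc.2)) (sub, c)).2
      = c + pvCost sub w := by
  induction w with
  | nil => intro sub c; simp [pvCost_nil]
  | cons t rest ih =>
    intro sub c
    rw [List.foldl_cons]
    simp only []
    by_cases h : sub.count t = 0
    · rw [if_pos (by simp [PySem.List.count_eq, h]), ih, pvCost_cons]
      have : sub.count t ≤ rest.count t := by omega
      rw [if_pos this]
      omega
    · have hmem : t ∈ sub := List.count_pos_iff.mp (Nat.pos_of_ne_zero h)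
      rw [if_neg (by simp [PySem.List.count_eq, h]),
        PySem.List.remove?_eq_some_erase _ _ hmem]
      simp only [Option.getD_some]
      rw [ih, pvCost_cons_erase _ _ _ hmem]

-- B's counting scan: folding the tokens of w into the deficit dictionary and cost
lemma pvScanB (w : List String) : ∀ (sub u : List String)
    (d : PySem.Dict String Int) (c : Int),
    (∀ x, d.getD x 0 = (sub.count x : Int) - u.count x) → c = pvCost sub u →
    (∀ x, (w.foldl pvScanStep (d, c)).1.getD x 0
        = (sub.count x : Int) - (u ++ w).count x) ∧
    (w.foldl pvScanStep (d, c)).2 = pvCost sub (u ++ w) := by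
  induction w with
  | nil => intro sub u d c hd hc; simpa using ⟨hd, hc⟩
  | cons t rest ih =>
    intro sub u d c hd hc
    rw [List.foldl_cons]
    simp only [pvScanStep]
    have hres := ih sub (u ++ [t]) (d.insert t (d.getD t 0 - 1))
      (if d.getD t 0 ≤ 0 then c + 1 else c)
      (by
        intro x
        rw [PySem.Dict.getD_insert]
        by_cases hx : x = t
        · subst hx
          rw [if_pos rfl, hd x]
          simp [List.count_append]
          omega
        · rw [if_neg hx, hd x]
          have : List.count x [t] = 0 := by
            simp [List.count_singleton]
            exact fun hh => hx hh.symm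
          simp [List.count_append, this])
      (by
        rw [hc, pvCost_concat]
        have hdt := hd t
        split_ifs with h1 h2 h2 <;> omega)
    simpa using hres

-- sliding the window one step to the right
lemma pvWinStep (m : List String) (L k : Nat) (h : k + L < m.length) :
    pvWin m L k ++ [m.getD (L + k) ""] = m.getD k "" :: pvWin m L (k+1) := by
  have hk : k < m.length := by omega
  have hLk : L + k < m.length := by omega
  have hL : L < (m.drop k).length := by simp; omega
  rw [List.getD_eq_getElem m "" hLk, List.getD_eq_getElem m "" hk]
  unfold pvWin
  have h1 : m[L + k] = (m.drop k)[L] := by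
    rw [List.getElem_drop]
    congr 1
    omega
  rw [h1, List.take_append_getElem]
  rw [List.drop_eq_getElem_cons hk, List.take_succ_cons]


-- B's sliding loop: after k slides the dictionary, cost and best pair are those of pvWin/pvBest
lemma pvMainB (sub m : List String) (d0 : PySem.Dict String Int) (c0 : Int)
    (hd0 : ∀ x, d0.getD x 0 = (sub.count x : Int) - (pvWin m sub.length 0).count x)
    (hc0 : c0 = pvCost sub (pvWin m sub.length 0)) :
    ∀ k, sub.length + k ≤ m.length →
    (∀ x, ((List.range k).foldl
        (fun st (j : Nat) => pvSlideStep sub m st ((sub.length : Int) + (j : Int)))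
        (d0, c0, 0, c0)).1.getD x 0
        = (sub.count x : Int) - (pvWin m sub.length k).count x) ∧
    ((List.range k).foldl
        (fun st (j : Nat) => pvSlideStep sub m st ((sub.length : Int) + (j : Int)))
        (d0, c0, 0, c0)).2.1 = pvCost sub (pvWin m sub.length k) ∧
    ((List.range k).foldl
        (fun st (j : Nat) => pvSlideStep sub m st ((sub.length : Int) + (j : Int)))
        (d0, c0, 0, c0)).2.2.1 = ((pvBest sub m sub.length k).1 : Int) ∧
    ((List.range k).foldl
        (fun st (j : Nat) => pvSlideStep sub m st ((sub.length : Int) + (j : Int)))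
        (d0, c0, 0, c0)).2.2.2 = (pvBest sub m sub.length k).2 := by
  intro k
  induction k with
  | zero =>
    intro _
    simp only [List.range_zero, List.foldl_nil, pvBest]
    exact ⟨hd0, hc0, rfl, hc0⟩
  | succ k ih =>
    intro hk
    obtain ⟨h1, h2, h3, h4⟩ := ih (by omega)
    rw [List.range_succ, List.foldl_append, List.foldl_cons, List.foldl_nil]
    set st := (List.range k).foldl
        (fun st (j : Nat) => pvSlideStep sub m st ((sub.length : Int) + (j : Int)))
        (d0, c0, 0, c0) with hst
    have ht : PySem.List.pyGetD m ((sub.length : Int) + (k : Int)) ""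
        = m.getD (sub.length + k) "" := by
      rw [show ((sub.length : Int) + (k : Int)) = ((sub.length + k : Nat) : Int) by push_cast; ring,
        PySem.List.pyGetD_natCast]
    have hu : PySem.List.pyGetD m ((sub.length : Int) + (k : Int) - (sub.length : Int)) ""
        = m.getD k "" := by
      rw [show ((sub.length : Int) + (k : Int) - (sub.length : Int)) = ((k : Nat) : Int) by ring,
        PySem.List.pyGetD_natCast]
    have hwstep := pvWinStep m sub.length k (by omega)
    -- the add step, via the one-token counting scan
    have hsingle := pvScanB [m.getD (sub.length + k) ""] sub (pvWin m sub.length k) st.1 st.2.1 h1 h2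
    rw [hwstep] at hsingle
    simp only [List.foldl_cons, List.foldl_nil, pvScanStep] at hsingle
    obtain ⟨hd1, hcost1⟩ := hsingle
    -- the remove step
    have hcnt : List.count (m.getD k "") (m.getD k "" :: pvWin m sub.length (k+1))
        = List.count (m.getD k "") (pvWin m sub.length (k+1)) + 1 := List.count_cons_self
    have hc2 := hd1 (m.getD k "")
    have hcost2 : (if (st.1.insert (m.getD (sub.length + k) "")
            (st.1.getD (m.getD (sub.length + k) "") 0 - 1)).getD (m.getD k "") 0 < 0
          then (if st.1.getD (m.getD (sub.length + k) "") 0 ≤ 0 then st.2.1 + 1 else st.2.1) - 1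
          else (if st.1.getD (m.getD (sub.length + k) "") 0 ≤ 0 then st.2.1 + 1 else st.2.1))
        = pvCost sub (pvWin m sub.length (k+1)) := by
      rw [hcost1, pvCost_cons]
      rw [hc2, hcnt]
      split_ifs with hA hB hB <;> push_cast at * <;> omega
    have hd2 : ∀ x, ((st.1.insert (m.getD (sub.length + k) "")
            (st.1.getD (m.getD (sub.length + k) "") 0 - 1)).insert (m.getD k "")
            ((st.1.insert (m.getD (sub.length + k) "")
              (st.1.getD (m.getD (sub.length + k) "") 0 - 1)).getD (m.getD k "") 0 + 1)).getD x 0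
        = (sub.count x : Int) - (pvWin m sub.length (k+1)).count x := by
      intro x
      rw [PySem.Dict.getD_insert]
      by_cases hx : x = m.getD k ""
      · subst hx
        rw [if_pos rfl, hc2, hcnt]
        push_cast
        ring
      · rw [if_neg hx, hd1 x, List.count_cons_of_ne (Ne.symm hx)]
    -- assemble the step
    unfold pvSlideStep
    simp only [ht, hu]
    rw [hcost2, h4, h3]
    simp only [pvBest]
    split_ifs with hlt
    · refine ⟨hd2, rfl, by push_cast; ring, rfl⟩
    · exact ⟨hd2, rfl, rfl, rfl⟩


-- A's outer loop: after starts 0..k the state is the best window so far and its cost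
lemma pvMainA (sub m : List String) :
    ∀ k, sub.length + k ≤ m.length →
    (List.range (k+1)).foldl (fun st (j : Nat) => pvStepA sub m st ((0 : Int) + (j : Int))) ([], none)
      = (pvWin m sub.length (pvBest sub m sub.length k).1,
         some (pvBest sub m sub.length k).2) := by
  intro k
  induction k with
  | zero =>
    intro _
    simp only [Nat.zero_add, List.range_one, List.foldl_cons, List.foldl_nil]
    simp only [pvStepA]
    rw [show ((0 : Int) + ((0 : Nat) : Int)) = ((0 : Nat) : Int) by norm_num]
    rw [show (((0 : Nat) : Int) + (sub.length : Int)) = (((0 + sub.length : Nat) : Nat) : Int) by push_cast; ring]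
    rw [PySem.List.slice_natCast, pvInnerA]
    simp only [pvBest, pvWin, Nat.sub_zero, List.drop_zero, zero_add]
  | succ k ih =>
    intro hk
    rw [List.range_succ, List.foldl_append, List.foldl_cons, List.foldl_nil,
      ih (by omega)]
    simp only [pvStepA]
    rw [show ((0 : Int) + ((k + 1 : Nat) : Int)) = ((k + 1 : Nat) : Int) by norm_num]
    rw [show (((k + 1 : Nat) : Int) + (sub.length : Int)) = ((k + 1 : Nat) : Int) + ((sub.length : Nat) : Int) by norm_num]
    rw [PySem.List.slice_natCast_add, pvInnerA]
    show (if 0 + pvCost sub ((m.drop (k+1)).take sub.length) < (pvBest sub m sub.length k).2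
      then ((m.drop (k+1)).take sub.length, some (0 + pvCost sub ((m.drop (k+1)).take sub.length)))
      else (pvWin m sub.length (pvBest sub m sub.length k).1, some (pvBest sub m sub.length k).2))
      = _
    rw [show (0 : Int) + pvCost sub ((m.drop (k+1)).take sub.length) = pvCost sub (pvWin m sub.length (k+1)) by rw [zero_add]; rfl]
    simp only [pvBest]
    split_ifs with hlt
    · rfl
    · rfl

-- ===== VERDICT (by name: the statement is the Claim_ definition above) =====
theorem get_alignment_2_spec : Claim_equal_get_alignment_2 := by
  intro sub m _
  unfold Spec_get_alignment_2
  by_cases h : m.length < sub.length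
  · -- no window fits: A's range is empty, B returns [] at once
    unfold get_alignment_2 get_alignment_2_alt
    rw [if_pos h, PySem.List.pyRange_one_eq_nil (by omega)]
    rfl
  · have hLn : sub.length ≤ m.length := by omega
    -- A's side
    unfold get_alignment_2
    rw [PySem.List.pyRange_one,
      show (((m.length : Int) - (sub.length : Int) + 1) - 0).toNat = (m.length - sub.length) + 1 by omega,
      List.foldl_map, pvMainA sub m (m.length - sub.length) (by omega)]
    -- B's side
    simp only [get_alignment_2_alt, if_neg h]
    rw [PySem.List.slice_to_natCast]
    set d0 := sub.foldl (fun (d : PySem.Dict String Int) t => d.insert t (d.getD t 0 + 1)) PySem.Dict.empty with hd0e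
    have hd0 : ∀ x, d0.getD x 0 = (sub.count x : Int) := by
      intro x
      rw [hd0e, PySem.Dict.getD_foldl_insert_add_one, PySem.Dict.getD_empty, zero_add]
    obtain ⟨hf1, hf2⟩ := pvScanB (m.take sub.length) sub [] d0 0
      (by intro x; simpa using hd0 x) (by rw [pvCost_nil])
    simp only [List.nil_append] at hf1 hf2
    have hw0 : pvWin m sub.length 0 = m.take sub.length := by
      simp [pvWin]
    rw [PySem.List.pyRange_one,
      show (((m.length : Int)) - (sub.length : Int)).toNat = m.length - sub.length by omega,
      List.foldl_map]
    have hmain := pvMainB sub m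
      ((m.take sub.length).foldl pvScanStep (d0, 0)).1
      ((m.take sub.length).foldl pvScanStep (d0, 0)).2
      (by intro x; rw [hf1 x, hw0]) (by rw [hf2, hw0])
      (m.length - sub.length) (by omega)
    rw [hmain.2.2.1, PySem.List.slice_natCast_add]
    rfl
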